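-- pv_equiv track=rewrite | github.com/AtomicLeap/Data-Strutures-and-Algorithms | Algorithms/Graphs/undirected_path.py | undirected_path_dfi
-- ===== SOURCE A (Python) =====
-- def _build_adjacency_list(edges_list: list[list[str]]) -> dict[str, list[str]]:
--     graph: dict[str, list[str]] = {}
--     for edge in edges_list:
--         [a, b] = edge
--         if a not in graph:
--             graph[a] = []
--         if b not in graph:
--             graph[b] = []
--         graph[a].append(b)
--         graph[b].append(a)
--     return graph
--
-- def undirected_path_dfi(edges: list[list[str]], node_a: str, node_b: str) -> bool:
--     graph = _build_adjacency_list(edges)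
--     stack = [node_a]
--     visited = {}
--
--     while stack:
--         current = stack.pop()
--         visited[current] = 1
--         if current == node_b:
--             return True
--
--         for neighbour in graph[current]:
--             if neighbour not in visited:
--                 stack.append(neighbour)
--     return False
-- ===== SOURCE B (Python) =====
-- def undirected_path_dfi(edges: list[list[str]], node_a: str, node_b: str) -> bool:
--     if node_a == node_b:
--         return True
--     graph = {}
--     for a, b in edges:
--         graph.setdefault(a, []).append(b)
--         graph.setdefault(b, []).append(a)
--     visited = {node_a}
--     queue = [node_a]
--     i = 0
--     while i < len(queue):
--         cur = queue[i]
--         i += 1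
--         for nb in graph[cur]:
--             if nb == node_b:
--                 return True
--             if nb not in visited:
--                 visited.add(nb)
--                 queue.append(nb)
--     return False
-- ===== Notes on version B (the rewrite author's own statement) =====
-- stated objective: alternative
-- what changed: Replaces A's LIFO-stack depth-first loop (visited marked at pop, target tested at pop, duplicates allowed on the stack) by a FIFO breadth-first traversal that tests node_a==node_b up front, marks nodes visited at enqueue time (each node enqueued at most once) and tests the target at neighbour-discovery time.
-- crash fix: When node_a == node_b but some edge does not have exactly two elements, A raises ValueError while building the adjacency list; B returns True before touching the edges. — e.g. on undirected_path_dfi([["x"]], "a", "a"): A raises ValueError, B returns true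
import Mathlib
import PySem

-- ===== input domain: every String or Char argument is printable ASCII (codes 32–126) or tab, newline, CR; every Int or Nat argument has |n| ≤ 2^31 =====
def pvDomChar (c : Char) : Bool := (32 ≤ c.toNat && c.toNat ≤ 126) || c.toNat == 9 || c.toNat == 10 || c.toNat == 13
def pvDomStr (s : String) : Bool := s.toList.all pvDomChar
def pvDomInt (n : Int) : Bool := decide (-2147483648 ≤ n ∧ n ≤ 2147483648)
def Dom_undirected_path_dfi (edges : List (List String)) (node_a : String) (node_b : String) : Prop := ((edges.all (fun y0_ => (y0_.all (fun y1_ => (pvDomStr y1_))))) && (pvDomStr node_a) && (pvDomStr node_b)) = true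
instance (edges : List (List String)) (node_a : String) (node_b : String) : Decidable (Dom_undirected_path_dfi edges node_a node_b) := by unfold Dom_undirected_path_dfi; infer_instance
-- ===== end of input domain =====

-- B replaces A's stack-based depth-first search by a breadth-first traversal (visited marked at
-- enqueue, target tested at neighbour discovery); same Bool on every input on which A returns.


-- ===== PORT A =====
-- _build_adjacency_list; '[a, b] = edge' raises ValueError on an edge of another shape —
-- those inputs are outside Pre_undirected_path_dfi, so the '| _ => g' branch is never reached there.
def buildAdj (edges_list : List (List String)) : PySem.Dict String (List String) :=
  edges_list.foldl (fun g edge =>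
    match edge with
    | [a, b] =>
      let g := if g.contains a then g else g.insert a []
      let g := if g.contains b then g else g.insert b []
      let g := g.modify a [] (fun l => l ++ [b])
      g.modify b [] (fun l => l ++ [a])
    | _ => g) PySem.Dict.empty

-- helpers cited by the loops' decreasing_by (termination measure only, not part of the algorithm)
def pvBase (g : PySem.Dict String (List String)) : List String := g.keys ++ g.values.flatten

def pvUnvis (g : PySem.Dict String (List String)) (stack visited : List String) : Nat :=
  ((stack ++ pvBase g).toFinset \ visited.toFinset).card

theorem mem_base_of_getD {g : PySem.Dict String (List String)} {c x : String}
    (h : x ∈ g.getD c []) : x ∈ pvBase g := by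
  rw [PySem.Dict.getD_eq_get?_getD] at h
  cases hg : g.get? c with
  | none => rw [hg] at h; simp at h
  | some v =>
    rw [hg] at h
    have hv : v ∈ g.values := by
      have := PySem.Dict.mem_items_of_get?_eq_some g hg
      simp [PySem.Dict.values]
      exact ⟨c, this⟩
    simp [pvBase]
    right; exact ⟨v, hv, h⟩

-- the 'while stack:' loop; list head = top of Python's stack, so the push sequence
-- 'for neighbour in graph[current]: … stack.append(neighbour)' becomes 'pushes.reverse ++ rest'.
-- 'graph[current]' raises KeyError iff current is no key; reachable only for current = node_a,
-- excluded by Pre_undirected_path_dfi, so 'getD … []' is exact on Pre_.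
def dfiLoop (g : PySem.Dict String (List String)) (node_b : String) :
    List String → PySem.Set String → Bool
  | [], _ => false
  | current :: rest, visited =>
    let visited' := PySem.Set.add visited current
    if current == node_b then true
    else
      let pushes := (g.getD current []).filter (fun n => !(PySem.Set.contains visited' n))
      dfiLoop g node_b (pushes.reverse ++ rest) visited'
  termination_by stack visited =>
    (pvUnvis g stack visited, (stack.filter (fun x => PySem.Set.contains visited x)).length)
  decreasing_by
    by_cases hc : current ∈ visited
    · -- current already visited: visited unchanged, first measure ≤, stack's visited-count drops
      have hv : PySem.Set.add visited current = visited := PySem.Set.add_of_mem hc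
      rw [hv]
      have hsub : ((((g.getD current []).filter (fun n => !(PySem.Set.contains visited n))).reverse ++ rest) ++ pvBase g).toFinset \ visited.toFinset ⊆ ((current :: rest) ++ pvBase g).toFinset \ visited.toFinset := by
        intro y hy
        simp only [Finset.mem_sdiff, List.mem_toFinset, List.mem_append, List.mem_reverse, List.mem_filter, List.mem_cons] at hy ⊢
        rcases hy with ⟨hy1, hy2⟩
        refine ⟨?_, hy2⟩
        rcases hy1 with (⟨hp, _⟩ | hr) | hb
        · right; exact mem_base_of_getD hp
        · left; right; exact hr
        · right; exact hb
      have hle := Finset.card_le_card hsub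
      have hflt : (((((g.getD current []).filter (fun n => !(PySem.Set.contains visited n))).reverse ++ rest)).filter (fun x => PySem.Set.contains visited x)) = rest.filter (fun x => PySem.Set.contains visited x) := by
        rw [List.filter_append]
        have : ((((g.getD current []).filter (fun n => !(PySem.Set.contains visited n))).reverse).filter (fun x => PySem.Set.contains visited x)) = [] := by
          rw [List.filter_eq_nil_iff]
          intro x hx
          simp only [List.mem_reverse, List.mem_filter, Bool.not_eq_eq_eq_not, Bool.not_true] at hx
          simp only [PySem.Set.contains_eq_listContains] at hx
          simpa using hx.2
        rw [this, List.nil_append]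
      rcases lt_or_eq_of_le hle with h | h
      · exact Prod.Lex.left _ _ h
      · show Prod.Lex _ _ (pvUnvis g _ visited, _) (pvUnvis g _ visited, _)
        unfold pvUnvis
        rw [h, hflt]
        apply Prod.Lex.right
        have : (current :: rest).filter (fun x => PySem.Set.contains visited x) = current :: rest.filter (fun x => PySem.Set.contains visited x) := by
          rw [List.filter_cons_of_pos]
          simpa [PySem.Set.contains_iff] using hc
        rw [this]
        simp
    · -- current freshly visited: first measure strictly decreases
      apply Prod.Lex.left
      apply Finset.card_lt_card
      constructor
      · intro y hy
        simp only [Finset.mem_sdiff, List.mem_toFinset, List.mem_append, List.mem_reverse, List.mem_filter, List.mem_cons] at hy ⊢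
        rcases hy with ⟨hy1, hy2⟩
        have hy2' : y ∉ visited := fun hmem => hy2 (by simp [PySem.Set.mem_add, hmem])
        refine ⟨?_, hy2'⟩
        rcases hy1 with (⟨hp, _⟩ | hr) | hb
        · right; exact mem_base_of_getD hp
        · left; right; exact hr
        · right; exact hb
      · intro hrev
        have hcur : current ∈ ((current :: rest) ++ pvBase g).toFinset \ visited.toFinset := by
          simp [hc]
        have := hrev hcur
        simp [PySem.Set.mem_add] at this

def undirected_path_dfi (edges : List (List String)) (node_a : String) (node_b : String) : Bool :=
  dfiLoop (buildAdj edges) node_b [node_a] PySem.Set.empty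

-- ===== PORT B =====
-- B's 'for nb in graph[cur]:' loop: (found node_b?, visited, nodes appended to the queue)
def bfsScan (node_b : String) : List String → PySem.Set String → List String →
    Bool × PySem.Set String × List String
  | [], visited, acc => (false, visited, acc)
  | nb :: ns, visited, acc =>
    if nb == node_b then (true, visited, acc)
    else if PySem.Set.contains visited nb then bfsScan node_b ns visited acc
    else bfsScan node_b ns (PySem.Set.add visited nb) (acc ++ [nb])

-- the appended nodes and the visited set after one scan

-- invariant of one scan, cited by bfsLoop's decreasing_by
theorem bfsScan_inv (node_b : String) : ∀ (ns : List String) (V : PySem.Set String) (acc : List String),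
    ∃ t : List String,
      (bfsScan node_b ns V acc).2.2 = acc ++ t ∧
      (∀ y, y ∈ (bfsScan node_b ns V acc).2.1 ↔ y ∈ V ∨ y ∈ t) ∧
      (∀ y ∈ t, y ∈ ns ∧ y ∉ V) ∧
      (t = [] → (bfsScan node_b ns V acc).2.1 = V)
  | [], V, acc => ⟨[], by simp [bfsScan]⟩
  | nb :: ns, V, acc => by
    by_cases hb : nb == node_b
    · exact ⟨[], by simp [bfsScan, hb]⟩
    · by_cases hcv : nb ∈ V
      · have e : bfsScan node_b (nb :: ns) V acc = bfsScan node_b ns V acc := by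
          simp [bfsScan, hb, hcv]
        obtain ⟨t, h1, h2, h3, h4⟩ := bfsScan_inv node_b ns V acc
        rw [e]
        exact ⟨t, h1, h2, fun y hy => ⟨List.mem_cons_of_mem _ (h3 y hy).1, (h3 y hy).2⟩, h4⟩
      · have e : bfsScan node_b (nb :: ns) V acc
            = bfsScan node_b ns (PySem.Set.add V nb) (acc ++ [nb]) := by
          simp [bfsScan, hb, hcv]
        obtain ⟨t, h1, h2, h3, h4⟩ := bfsScan_inv node_b ns (PySem.Set.add V nb) (acc ++ [nb])
        rw [e]
        refine ⟨nb :: t, by simpa using h1, ?_, ?_, by intro h; cases h⟩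
        · intro y
          rw [h2 y, PySem.Set.mem_add]
          constructor
          · rintro ((hy | hy) | hy) <;> simp [hy]
          · intro hy
            rcases hy with hy | hy
            · simp [hy]
            · rcases List.mem_cons.mp hy with rfl | hy <;> simp [hy]
        · intro y hy0
          rcases List.mem_cons.mp hy0 with rfl | hy
          · exact ⟨by simp, hcv⟩
          · obtain ⟨hy1, hy2⟩ := h3 y hy
            refine ⟨List.mem_cons_of_mem _ hy1, fun hv => hy2 ?_⟩
            rw [PySem.Set.mem_add]
            exact Or.inl hv

-- B's 'while i < len(queue):' index loop over a growing list, modelled as recursion on the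
-- unprocessed suffix queue[i:] with the freshly appended nodes joined at its end ('rest ++ newNodes').
-- As in port A, 'graph[cur]' can only miss for cur = node_a, excluded by Pre_.
def bfsLoop (g : PySem.Dict String (List String)) (node_b : String) :
    List String → PySem.Set String → Bool
  | [], _ => false
  | cur :: rest, visited =>
    match h : bfsScan node_b (g.getD cur []) visited [] with
    | (found, visited', newNodes) =>
      if found then true else bfsLoop g node_b (rest ++ newNodes) visited'
  termination_by queue visited => (pvUnvis g queue visited, queue.length)
  decreasing_by
    obtain ⟨t, h1, h2, h3, h4⟩ := bfsScan_inv node_b (g.getD cur []) visited []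
    rw [h] at h1 h2 h4
    simp only [List.nil_append] at h1 h2 h4
    subst h1
    cases newNodes with
    | nil =>
      have hv := h4 rfl
      rw [hv]
      have hsub : ((rest ++ ([] : List String)) ++ pvBase g).toFinset \ List.toFinset visited ⊆ ((cur :: rest) ++ pvBase g).toFinset \ List.toFinset visited := by
        intro y hy
        simp only [Finset.mem_sdiff, List.mem_toFinset, List.mem_append, List.mem_cons] at hy ⊢
        tauto
      rcases lt_or_eq_of_le (Finset.card_le_card hsub) with h | h
      · exact Prod.Lex.left _ _ h
      · show Prod.Lex _ _ (pvUnvis g _ _, _) (pvUnvis g _ _, _)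
        unfold pvUnvis
        rw [h]
        apply Prod.Lex.right
        simp
    | cons x t' =>
      apply Prod.Lex.left
      apply Finset.card_lt_card
      have hx := h3 x (by simp)
      constructor
      · intro y hy
        simp only [Finset.mem_sdiff, List.mem_toFinset, List.mem_append, List.mem_cons] at hy ⊢
        rcases hy with ⟨hy1, hy2⟩
        have hy2' : y ∉ visited := fun hm => hy2 ((h2 y).mpr (Or.inl hm))
        refine ⟨?_, hy2'⟩
        rcases hy1 with (hr | ht) | hb
        · left; right; exact hr
        · right; exact mem_base_of_getD (h3 y (List.mem_cons.mpr ht)).1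
        · right; exact hb
      · intro hrev
        have hxin : x ∈ ((cur :: rest) ++ pvBase g).toFinset \ List.toFinset visited := by
          simp only [Finset.mem_sdiff, List.mem_toFinset, List.mem_append, List.mem_cons]
          exact ⟨Or.inr (mem_base_of_getD hx.1), hx.2⟩
        exact absurd ((Finset.mem_sdiff.mp (hrev hxin)).2)
          (by simp [(h2 x).mpr (Or.inr (by simp))])

-- B builds the adjacency list with setdefault
def buildAdjB (edges : List (List String)) : PySem.Dict String (List String) :=
  edges.foldl (fun g edge =>
    match edge with
    | [a, b] =>
      let g := (g.setdefault a []).modify a [] (fun l => l ++ [b])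
      (g.setdefault b []).modify b [] (fun l => l ++ [a])
    | _ => g) PySem.Dict.empty

def undirected_path_dfi_alt (edges : List (List String)) (node_a : String) (node_b : String) : Bool :=
  if node_a == node_b then true
  else bfsLoop (buildAdjB edges) node_b [node_a] (PySem.Set.add PySem.Set.empty node_a)

-- ===== PRECONDITION & SPEC =====
-- Pre_ = exactly the inputs on which the Python A returns: every edge has two endpoints (else
-- ValueError while unpacking) and node_a occurs in some edge or equals node_b (else KeyError on
-- graph[node_a]).
def Pre_undirected_path_dfi (edges : List (List String)) (node_a : String) (node_b : String) : Prop :=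
  (∀ e ∈ edges, e.length = 2) ∧ (node_a = node_b ∨ ∃ e ∈ edges, node_a ∈ e)
instance (edges : List (List String)) (node_a : String) (node_b : String) : Decidable (Pre_undirected_path_dfi edges node_a node_b) := by unfold Pre_undirected_path_dfi; infer_instance

def pvWitness_undirected_path_dfi : List (List String) × String × String := ([["a", "b"], ["b", "c"]], "a", "c")

-- When node_a == node_b but some edge does not have exactly two elements, A raises ValueError
-- while building the adjacency list; B returns True before touching the edges.
def Raises_undirected_path_dfi (edges : List (List String)) (node_a : String) (node_b : String) : Prop :=
  node_a = node_b ∧ ∃ e ∈ edges, e.length ≠ 2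
instance (edges : List (List String)) (node_a : String) (node_b : String) : Decidable (Raises_undirected_path_dfi edges node_a node_b) := by unfold Raises_undirected_path_dfi; infer_instance
def pvRaiseWitness_undirected_path_dfi : List (List String) × String × String := ([["x"]], "a", "a")
def pvRaiseWitnessOut_undirected_path_dfi : Bool := true

def Spec_undirected_path_dfi (edges : List (List String)) (node_a : String) (node_b : String) (out : Bool) : Prop := out = undirected_path_dfi_alt edges node_a node_b
instance (edges : List (List String)) (node_a : String) (node_b : String) (out : Bool) : Decidable (Spec_undirected_path_dfi edges node_a node_b out) := by unfold Spec_undirected_path_dfi; infer_instance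

-- ===== CLAIM (what is proved, stated in full; the proofs are below) =====
def Claim_equal_undirected_path_dfi : Prop := ∀ (edges : List (List String)) (node_a : String) (node_b : String), Dom_undirected_path_dfi edges node_a node_b → Pre_undirected_path_dfi edges node_a node_b → Spec_undirected_path_dfi edges node_a node_b (undirected_path_dfi edges node_a node_b)
def Claim_raises_undirected_path_dfi : Prop := (∀ (edges : List (List String)) (node_a : String) (node_b : String), Dom_undirected_path_dfi edges node_a node_b → Raises_undirected_path_dfi edges node_a node_b → ¬ Pre_undirected_path_dfi edges node_a node_b) ∧ (Dom_undirected_path_dfi (pvRaiseWitness_undirected_path_dfi.1) (pvRaiseWitness_undirected_path_dfi.2.1) (pvRaiseWitness_undirected_path_dfi.2.2) ∧ Raises_undirected_path_dfi (pvRaiseWitness_undirected_path_dfi.1) (pvRaiseWitness_undirected_path_dfi.2.1) (pvRaiseWitness_undirected_path_dfi.2.2) ∧ undirected_path_dfi_alt (pvRaiseWitness_undirected_path_dfi.1) (pvRaiseWitness_undirected_path_dfi.2.1) (pvRaiseWitness_undirected_path_dfi.2.2) = pvRaiseWitnessOut_undirected_path_dfi)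

-- ===== LEMMAS AND PROOFS =====
-- walks: AWalk g V x us b = a chain x → … → b whose step nodes avoid V;
-- BWalk additionally demands at least one step and does not constrain its endpoint
def AWalk (g : PySem.Dict String (List String)) (V : List String) : String → List String → String → Prop
  | x, [], b => x = b
  | x, u :: us, b => u ∈ g.getD x [] ∧ u ∉ V ∧ AWalk g V u us b

def BWalk (g : PySem.Dict String (List String)) (V : List String) : String → List String → String → Prop
  | _, [], _ => False
  | x, [u], b => u ∈ g.getD x [] ∧ u = b
  | x, u :: v :: us, b => u ∈ g.getD x [] ∧ u ∉ V ∧ BWalk g V u (v :: us) b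

theorem AWalk_avoid {g : PySem.Dict String (List String)} {V V' : List String} {b : String} :
    ∀ {us : List String} {x : String}, AWalk g V x us b → (∀ y ∈ us, y ∉ V') → AWalk g V' x us b
  | [], x, h, _ => h
  | u :: us, x, h, hav => by
    obtain ⟨h1, _, h3⟩ := h
    exact ⟨h1, hav u (by simp), AWalk_avoid h3 (fun y hy => hav y (by simp [hy]))⟩

theorem AWalk_cut {g : PySem.Dict String (List String)} {V : List String} {b : String} (c : String) :
    ∀ {us : List String} {x : String}, AWalk g V x us b →
      (∃ us', AWalk g V x us' b ∧ c ∉ us') ∨ (∃ us', AWalk g V c us' b ∧ c ∉ us')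
  | [], x, h => Or.inl ⟨[], h, by simp⟩
  | u :: us, x, h => by
    obtain ⟨h1, h2, h3⟩ := h
    rcases AWalk_cut c h3 with ⟨us', hw, hc⟩ | ⟨us', hw, hc⟩
    · by_cases hu : u = c
      · subst hu; exact Or.inr ⟨us', hw, hc⟩
      · exact Or.inl ⟨u :: us', ⟨h1, h2, hw⟩, by simp [hc, Ne.symm hu]⟩
    · exact Or.inr ⟨us', hw, hc⟩

theorem dfi_sound {g : PySem.Dict String (List String)} {node_b : String} :
    ∀ (stack : List String) (visited : PySem.Set String),
      dfiLoop g node_b stack visited = true →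
      ∃ x ∈ stack, ∃ us, AWalk g [] x us node_b := by
  intro stack visited
  induction stack, visited using dfiLoop.induct g node_b with
  | case1 => simp [dfiLoop]
  | case2 current rest visited hb =>
    intro _
    exact ⟨current, by simp, [], by simpa using hb⟩
  | case3 current rest visited v' hb p ih =>
    intro h
    rw [dfiLoop, if_neg hb] at h
    obtain ⟨x, hx, us, hw⟩ := ih h
    rcases List.mem_append.mp hx with hx | hx
    · rw [List.mem_reverse, List.mem_filter] at hx
      exact ⟨current, by simp, x :: us, ⟨hx.1, by simp, hw⟩⟩
    · exact ⟨x, by simp [hx], us, hw⟩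

theorem AWalk_avoid' {g : PySem.Dict String (List String)} {V : List String} {b c : String}
    {V' : List String} (hV : ∀ y, y ∈ V' → y ∈ V ∨ y = c) :
    ∀ {us : List String} {x : String}, AWalk g V x us b → c ∉ us → AWalk g V' x us b
  | [], x, h, _ => h
  | u :: us, x, h, hc => by
    obtain ⟨h1, h2, h3⟩ := h
    refine ⟨h1, ?_, AWalk_avoid' hV h3 (fun hm => hc (by simp [hm]))⟩
    intro hm
    rcases hV u hm with hm | rfl
    · exact h2 hm
    · exact hc (by simp)

theorem dfi_complete {g : PySem.Dict String (List String)} {node_b : String} :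
    ∀ (stack : List String) (visited : PySem.Set String),
      (∃ x ∈ stack, ∃ us, AWalk g visited x us node_b) →
      dfiLoop g node_b stack visited = true := by
  intro stack visited
  induction stack, visited using dfiLoop.induct g node_b with
  | case1 => rintro ⟨x, hx, _⟩; simp at hx
  | case2 current rest visited hb => intro _; rw [dfiLoop, if_pos hb]
  | case3 current rest visited v' hb p ih =>
    rintro ⟨x, hx, us, hw⟩
    rw [dfiLoop, if_neg hb]
    have hVmem : ∀ y, y ∈ PySem.Set.add visited current → y ∈ visited ∨ y = current := by
      intro y hy; exact (PySem.Set.mem_add _ _ _).mp hy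
    have hne : current ≠ node_b := by simpa using hb
    -- a witness starting at the popped node yields a witness on the new stack
    have key : ∀ us', AWalk g visited current us' node_b → current ∉ us' →
        ∃ x' ∈ (List.filter (fun n => !(PySem.Set.contains (PySem.Set.add visited current) n)) (g.getD current [])).reverse ++ rest,
          ∃ us'', AWalk g (PySem.Set.add visited current) x' us'' node_b := by
      intro us' hw' hc
      cases us' with
      | nil => exact absurd hw' hne
      | cons u us2 =>
        obtain ⟨h1, h2, h3⟩ := hw'
        have hu : u ∉ PySem.Set.add visited current := by
          rw [PySem.Set.mem_add _ _ _]
          rintro (hm | rfl)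
          · exact h2 hm
          · exact hc (by simp)
        refine ⟨u, ?_, us2, AWalk_avoid' hVmem h3 (fun hm => hc (by simp [hm]))⟩
        apply List.mem_append.mpr
        left
        rw [List.mem_reverse, List.mem_filter]
        refine ⟨h1, ?_⟩
        simp only [PySem.Set.contains_eq_listContains]
        simpa using hu
    rcases AWalk_cut current hw with ⟨us', hw', hc⟩ | ⟨us', hw', hc⟩
    · rcases List.mem_cons.mp hx with rfl | hx
      · exact ih (key us' hw' hc)
      · refine ih ⟨x, by simp [hx], us', AWalk_avoid' hVmem hw' hc⟩
    · exact ih (key us' hw' hc)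

theorem bfsScan_found (node_b : String) : ∀ (ns : List String) (V : PySem.Set String) (acc : List String),
    (bfsScan node_b ns V acc).1 = true ↔ node_b ∈ ns
  | [], V, acc => by simp [bfsScan]
  | nb :: ns, V, acc => by
    by_cases hb : nb == node_b
    · simp only [bfsScan, hb, if_pos]
      simpa [eq_comm] using Or.inl (by simpa using hb : nb = node_b)
    · have hnb : nb ≠ node_b := by simpa using hb
      by_cases hcv : nb ∈ V
      · have e : bfsScan node_b (nb :: ns) V acc = bfsScan node_b ns V acc := by
          simp [bfsScan, hb, hcv]
        rw [e, bfsScan_found node_b ns V acc]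
        simp [Ne.symm hnb]
      · have e : bfsScan node_b (nb :: ns) V acc
            = bfsScan node_b ns (PySem.Set.add V nb) (acc ++ [nb]) := by
          simp [bfsScan, hb, hcv]
        rw [e, bfsScan_found node_b ns _ _]
        simp [Ne.symm hnb]

theorem bfsScan_covers (node_b : String) : ∀ (ns : List String) (V : PySem.Set String) (acc : List String),
    (bfsScan node_b ns V acc).1 = false → ∀ y ∈ ns, y ∈ (bfsScan node_b ns V acc).2.1
  | [], V, acc => by simp
  | nb :: ns, V, acc => by
    intro hfalse y hy
    by_cases hb : nb == node_b
    · rw [show bfsScan node_b (nb :: ns) V acc = (true, V, acc) from by simp [bfsScan, hb]] at hfalse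
      cases hfalse
    · by_cases hcv : nb ∈ V
      · have e : bfsScan node_b (nb :: ns) V acc = bfsScan node_b ns V acc := by
          simp [bfsScan, hb, hcv]
        rw [e] at hfalse ⊢
        rcases List.mem_cons.mp hy with heq | hy
        · obtain ⟨t, _, h2, _, _⟩ := bfsScan_inv node_b ns V acc
          exact (h2 y).mpr (Or.inl (heq ▸ hcv))
        · exact bfsScan_covers node_b ns V acc hfalse y hy
      · have e : bfsScan node_b (nb :: ns) V acc
            = bfsScan node_b ns (PySem.Set.add V nb) (acc ++ [nb]) := by
          simp [bfsScan, hb, hcv]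
        rw [e] at hfalse ⊢
        rcases List.mem_cons.mp hy with heq | hy
        · obtain ⟨t, _, h2, _, _⟩ := bfsScan_inv node_b ns (PySem.Set.add V nb) (acc ++ [nb])
          exact (h2 y).mpr (Or.inl ((PySem.Set.mem_add _ _ _).mpr (Or.inr heq)))
        · exact bfsScan_covers node_b ns _ _ hfalse y hy

theorem BWalk_ne_nil {g : PySem.Dict String (List String)} {V : List String} {x b : String}
    {us : List String} (h : BWalk g V x us b) : us ≠ [] := by
  cases us with
  | nil => exact absurd h (by simp [BWalk])
  | cons u us => simp

-- transfer a BWalk to a bigger avoid-set as long as its intermediates stay outside it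

theorem BWalk_transfer {g : PySem.Dict String (List String)} {V V' : List String} {b : String} :
    ∀ {us : List String} {x : String}, BWalk g V x us b →
      (∀ y ∈ us.dropLast, y ∉ V') → BWalk g V' x us b
  | [], x, h, _ => h.elim
  | [u], x, h, _ => h
  | u :: v :: us, x, h, hav => by
    obtain ⟨h1, _, h3⟩ := h
    refine ⟨h1, hav u (by simp), BWalk_transfer h3 ?_⟩
    intro y hy
    refine hav y ?_
    simp only [List.dropLast_cons_of_ne_nil (by simp : (v :: us) ≠ [])] at *
    exact List.mem_cons_of_mem _ hy

-- extract a strictly shorter BWalk starting at any intermediate node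

theorem BWalk_extract {g : PySem.Dict String (List String)} {V : List String} {b z : String} :
    ∀ {us : List String} {x : String}, BWalk g V x us b → z ∈ us.dropLast →
      ∃ us', BWalk g V z us' b ∧ us'.length < us.length
  | [], x, h, _ => h.elim
  | [u], x, _, hz => by simp at hz
  | u :: v :: us, x, h, hz => by
    obtain ⟨h1, h2, h3⟩ := h
    rw [List.dropLast_cons_of_ne_nil (by simp : (v :: us) ≠ []), List.mem_cons] at hz
    rcases hz with rfl | hz
    · exact ⟨v :: us, h3, by simp⟩
    · obtain ⟨us', hw, hl⟩ := BWalk_extract h3 hz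
      exact ⟨us', hw, Nat.lt_succ_of_lt hl⟩

theorem BWalk_inter_not_mem {g : PySem.Dict String (List String)} {V : List String} {b : String} :
    ∀ {us : List String} {x : String}, BWalk g V x us b → ∀ y ∈ us.dropLast, y ∉ V
  | [], x, h => h.elim
  | [u], x, _ => by simp
  | u :: v :: us, x, h => by
    obtain ⟨_, h2, h3⟩ := h
    intro y hy
    rw [List.dropLast_cons_of_ne_nil (by simp : (v :: us) ≠ []), List.mem_cons] at hy
    rcases hy with rfl | hy
    · exact h2
    · exact BWalk_inter_not_mem h3 y hy

theorem bfs_reroot {g : PySem.Dict String (List String)} {V V' : List String} {b : String}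
    {queue' T : List String}
    (hV : ∀ y, y ∈ V' ↔ y ∈ V ∨ y ∈ T) (hT : ∀ y ∈ T, y ∈ queue') :
    ∀ (n : Nat) {us : List String} {x : String}, us.length ≤ n → BWalk g V x us b →
      x ∈ queue' → ∃ x' ∈ queue', ∃ us', BWalk g V' x' us' b := by
  intro n
  induction n with
  | zero => intro us x hl hw _; exact absurd (List.eq_nil_of_length_eq_zero (Nat.le_zero.mp hl)) (BWalk_ne_nil hw)
  | succ n ih =>
    intro us x hl hw hx
    by_cases hav : ∀ y ∈ us.dropLast, y ∉ V'
    · exact ⟨x, hx, us, BWalk_transfer hw hav⟩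
    · push Not at hav
      obtain ⟨z, hz, hzV'⟩ := hav
      have hzT : z ∈ T := by
        rcases (hV z).mp hzV' with hzV | hzT
        · exact absurd hzV (BWalk_inter_not_mem hw z hz)
        · exact hzT
      obtain ⟨us', hw', hl'⟩ := BWalk_extract hw hz
      exact ih (Nat.le_of_lt_succ (Nat.lt_of_lt_of_le hl' hl)) hw' (hT z hzT)

theorem bfs_sound {g : PySem.Dict String (List String)} {node_b : String} :
    ∀ (queue : List String) (visited : PySem.Set String),
      bfsLoop g node_b queue visited = true →
      ∃ x ∈ queue, ∃ us, BWalk g [] x us node_b := by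
  intro queue visited
  induction queue, visited using bfsLoop.induct g node_b with
  | case1 => simp [bfsLoop]
  | case2 current rest visited visited' newNodes hscan =>
    intro _
    have hb : node_b ∈ g.getD current [] := by
      rw [← bfsScan_found node_b (g.getD current []) visited [], hscan]
    exact ⟨current, by simp, [node_b], ⟨hb, rfl⟩⟩
  | case3 current rest visited found visited' newNodes hscan hfound ih =>
    intro h
    rw [bfsLoop] at h
    rw [hscan] at h
    simp only [hfound, Bool.false_eq_true, if_false] at h
    obtain ⟨x, hx, us, hw⟩ := ih h
    obtain ⟨t, h1, h2, h3, h4⟩ := bfsScan_inv node_b (g.getD current []) visited []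
    rw [hscan] at h1
    simp only [List.nil_append] at h1
    subst h1
    rcases List.mem_append.mp hx with hx | hx
    · exact ⟨x, by simp [hx], us, hw⟩
    · refine ⟨current, by simp, x :: us, ?_⟩
      have hxg : x ∈ g.getD current [] := (h3 x hx).1
      cases us with
      | nil => exact absurd hw (by simp [BWalk])
      | cons v vs => exact ⟨hxg, by simp, hw⟩

theorem bfs_complete {g : PySem.Dict String (List String)} {node_b : String} :
    ∀ (queue : List String) (visited : PySem.Set String),
      (∃ x ∈ queue, ∃ us, BWalk g visited x us node_b) →
      bfsLoop g node_b queue visited = true := by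
  intro queue visited
  induction queue, visited using bfsLoop.induct g node_b with
  | case1 => rintro ⟨x, hx, _⟩; simp at hx
  | case2 current rest visited visited' newNodes hscan =>
    intro _
    rw [bfsLoop, hscan]
    simp
  | case3 current rest visited found visited' newNodes hscan hfound ih =>
    rintro ⟨x, hx, us, hw⟩
    rw [bfsLoop, hscan]
    simp only [hfound, Bool.false_eq_true, if_false]
    obtain ⟨t, h1, h2, h3, h4⟩ := bfsScan_inv node_b (g.getD current []) visited []
    rw [hscan] at h1 h2
    simp only [List.nil_append] at h1 h2
    subst h1
    have hbnotin : node_b ∉ g.getD current [] := by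
      intro hbm
      have := (bfsScan_found node_b (g.getD current []) visited []).mpr hbm
      rw [hscan] at this
      exact hfound this
    have hT : ∀ y ∈ newNodes, y ∈ rest ++ newNodes := fun y hy => by simp [hy]
    have hV : ∀ y, y ∈ visited' ↔ y ∈ visited ∨ y ∈ newNodes := h2
    have hfalse : (bfsScan node_b (g.getD current []) visited []).1 = false := by
      rw [hscan]
      cases found
      · rfl
      · exact absurd rfl hfound
    have hstep : ∀ u, u ∈ g.getD current [] → u ∉ visited → u ∈ newNodes := by
      intro u hu1 hu2
      have huVis := bfsScan_covers node_b (g.getD current []) visited [] hfalse u hu1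
      rw [hscan] at huVis
      rcases (h2 u).mp huVis with huV | huN
      · exact absurd huV hu2
      · exact huN
    rcases List.mem_cons.mp hx with rfl | hx
    · -- the witness starts at the dequeued node: step one edge along it
      cases us with
      | nil => exact absurd hw (by simp [BWalk])
      | cons u us2 =>
        cases us2 with
        | nil =>
          obtain ⟨hu1, hu2⟩ := hw
          subst hu2
          exact absurd hu1 hbnotin
        | cons v vs =>
          obtain ⟨hu1, hu2, hu3⟩ := hw
          have huN : u ∈ newNodes := hstep u hu1 hu2
          exact ih (bfs_reroot hV (fun y hy => hT y hy) (v :: vs).length le_rfl hu3 (hT u huN))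
    · exact ih (bfs_reroot hV (fun y hy => hT y hy) us.length le_rfl hw (by simp [hx]))

theorem BWalk_to_AWalk {g : PySem.Dict String (List String)} {V : List String} {b : String} :
    ∀ {us : List String} {x : String}, BWalk g V x us b → AWalk g [] x us b
  | [], x, h => h.elim
  | [u], x, h => ⟨h.1, by simp, h.2⟩
  | u :: v :: us, x, h => ⟨h.1, by simp, BWalk_to_AWalk h.2.2⟩

theorem AWalk_to_BWalk {g : PySem.Dict String (List String)} {V : List String} {b : String} :
    ∀ {us : List String} {x : String}, AWalk g [] x us b → us ≠ [] →
      (∀ y ∈ us, y ∉ V) → BWalk g V x us b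
  | [], x, _, hne, _ => absurd rfl hne
  | [u], x, h, _, _ => ⟨h.1, h.2.2⟩
  | u :: v :: us, x, h, _, hav =>
    ⟨h.1, hav u (by simp), AWalk_to_BWalk h.2.2 (by simp) (fun y hy => hav y (by simp [hy]))⟩

theorem sd_eq_ite (g : PySem.Dict String (List String)) (k : String) (v : List String) :
    g.setdefault k v = if g.contains k = true then g else g.insert k v := by
  by_cases h : g.contains k = true
  · rw [if_pos h, PySem.Dict.setdefault_of_contains _ _ h]
  · have h' : g.contains k = false := by simpa using h
    rw [if_neg h, PySem.Dict.setdefault_of_not_contains _ _ h']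

-- setdefault at b commutes with a value-modification at an existing key a

theorem sd_modify_comm (g : PySem.Dict String (List String)) (a b : String)
    (d : List String) (f : List String → List String) (v : List String)
    (ha : g.contains a = true) :
    (g.modify a d f).setdefault b v = (g.setdefault b v).modify a d f := by
  by_cases hb : g.contains b = true
  · have hbm : (g.modify a d f).contains b = true := by
      simp [PySem.Dict.modify, PySem.Dict.contains_insert, hb]
    rw [PySem.Dict.setdefault_of_contains _ _ hbm, PySem.Dict.setdefault_of_contains _ _ hb]
  · have hab : a ≠ b := fun h => hb (h ▸ ha)
    have hb' : g.contains b = false := by simpa using hb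
    have hbm : (g.modify a d f).contains b = false := by
      simp [PySem.Dict.modify, PySem.Dict.contains_insert, hb', Ne.symm hab]
    rw [PySem.Dict.setdefault_of_not_contains _ _ hbm, PySem.Dict.setdefault_of_not_contains _ _ hb']
    have hga : (g.insert b v).getD a d = g.getD a d :=
      PySem.Dict.getD_insert_of_ne g _ _ hab
    rw [PySem.Dict.modify, PySem.Dict.modify, hga]
    have hca : (g.insert b v).contains a = true := by
      simp [PySem.Dict.contains_insert, ha]
    apply PySem.Dict.ext
    have hbm2 : (g.insert a (f (g.getD a d))).contains b = false := hbm
    rw [PySem.Dict.items_insert_of_not_contains _ _ hbm2,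
        PySem.Dict.items_insert_of_contains _ _ ha,
        PySem.Dict.items_insert_of_contains _ _ hca,
        PySem.Dict.items_insert_of_not_contains _ _ hb']
    simp [List.map_append, Ne.symm hab]

-- A's and B's adjacency-list builders produce the same dict

theorem build_eq (edges : List (List String)) : buildAdjB edges = buildAdj edges := by
  unfold buildAdjB buildAdj
  congr 1
  funext g edge
  match edge with
  | [] => rfl
  | [a] => rfl
  | a :: b :: c :: rest => rfl
  | [a, b] =>
    have ha : (g.setdefault a []).contains a = true := by
      simp [PySem.Dict.contains_setdefault]
    show (((g.setdefault a []).modify a [] (fun l => l ++ [b])).setdefault b []).modify b [] (fun l => l ++ [a]) = _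
    rw [sd_modify_comm _ a b _ _ _ ha]
    rw [sd_eq_ite g a [], sd_eq_ite (if g.contains a = true then g else g.insert a []) b []]

theorem loops_agree (g : PySem.Dict String (List String)) (a b : String) (hne : a ≠ b) :
    dfiLoop g b [a] PySem.Set.empty = bfsLoop g b [a] (PySem.Set.add PySem.Set.empty a) := by
  have hAiff : dfiLoop g b [a] PySem.Set.empty = true ↔ ∃ us, AWalk g [] a us b := by
    constructor
    · intro h
      obtain ⟨x, hx, us, hw⟩ := dfi_sound [a] PySem.Set.empty h
      rcases List.mem_singleton.mp hx with rfl
      exact ⟨us, hw⟩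
    · rintro ⟨us, hw⟩
      exact dfi_complete [a] PySem.Set.empty ⟨a, by simp, us, hw⟩
  have hBiff : bfsLoop g b [a] (PySem.Set.add PySem.Set.empty a) = true ↔ ∃ us, AWalk g [] a us b := by
    constructor
    · intro h
      obtain ⟨x, hx, us, hw⟩ := bfs_sound [a] _ h
      rcases List.mem_singleton.mp hx with rfl
      exact ⟨us, BWalk_to_AWalk hw⟩
    · rintro ⟨us, hw⟩
      rcases AWalk_cut a hw with ⟨us', hw', hc⟩ | ⟨us', hw', hc⟩ <;>
      · have hne' : us' ≠ [] := by
          intro h0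
          subst h0
          exact hne (by simpa [AWalk] using hw')
        refine bfs_complete [a] _ ⟨a, by simp, us', AWalk_to_BWalk hw' hne' ?_⟩
        intro y hy hmem
        have : y = a := by simpa [PySem.Set.empty, PySem.Set.add] using hmem
        subst this
        exact hc hy
  rw [Bool.eq_iff_iff, hAiff, hBiff]

-- ===== VERDICT (by name: the statements are the Claim_ definitions above) =====
@[simp]
theorem undirected_path_dfi_raises : Claim_raises_undirected_path_dfi := by
  unfold Claim_raises_undirected_path_dfi
  constructor
  · rintro edges node_a node_b _ ⟨_, e, he, hlen⟩ ⟨hall, _⟩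
    exact hlen (hall e he)
  · exact ⟨by decide, by decide, by decide⟩

theorem undirected_path_dfi_spec : Claim_equal_undirected_path_dfi := by
  intro edges node_a node_b _ _
  unfold Spec_undirected_path_dfi
  by_cases h : node_a = node_b
  · subst h
    rw [undirected_path_dfi, undirected_path_dfi_alt, dfiLoop]
    simp
  · rw [undirected_path_dfi, undirected_path_dfi_alt, if_neg (by simpa using h), build_eq]
    exact loops_agree _ _ _ h
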